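-- pv_equiv track=rewrite | github.com/xiaomyung/homepage | games/football/evolution/ga.py | _layer_offsets
-- ===== SOURCE A (Python) =====
-- def _layer_offsets(arch: list[int]) -> list[int]:
--     """Start offset of each layer in the flat weights array, plus the total."""
--     offsets = [0]
--     acc = 0
--     for i in range(len(arch) - 1):
--         fan_in = arch[i]
--         fan_out = arch[i + 1]
--         acc += fan_in * fan_out + fan_out
--         offsets.append(acc)
--     return offsets
-- ===== SOURCE B (Python) =====
-- def _layer_offsets(arch: list[int]) -> list[int]:
--     """Start offset of each layer in the flat weights array, plus the total."""
--     rem = sum(x * y + y for x, y in zip(arch, arch[1:]))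
--     out = [rem]
--     for x, y in zip(reversed(arch[:-1]), reversed(arch[1:])):
--         rem -= x * y + y
--         out.append(rem)
--     out.reverse()
--     return out
-- ===== Notes on version B (the rewrite author's own statement) =====
-- stated objective: alternative
-- what changed: Back-to-front construction: B first computes the grand total of all layer costs, then walks the layer pairs in reverse order subtracting each layer's cost from the running remainder, building the offsets list reversed and flipping it at the end, instead of A's forward index loop with a growing accumulator.
import Mathlib
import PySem

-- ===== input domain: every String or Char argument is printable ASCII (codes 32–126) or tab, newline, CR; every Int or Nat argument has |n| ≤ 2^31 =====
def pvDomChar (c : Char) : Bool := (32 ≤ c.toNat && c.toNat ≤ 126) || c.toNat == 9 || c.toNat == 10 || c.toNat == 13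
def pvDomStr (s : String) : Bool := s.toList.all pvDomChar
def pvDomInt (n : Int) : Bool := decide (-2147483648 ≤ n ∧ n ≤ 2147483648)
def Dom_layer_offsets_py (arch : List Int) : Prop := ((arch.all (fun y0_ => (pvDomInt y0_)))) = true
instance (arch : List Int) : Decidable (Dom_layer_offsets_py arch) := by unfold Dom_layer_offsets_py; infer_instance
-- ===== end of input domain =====

-- B builds the offsets back-to-front: grand total first, then reverse walk over the layer pairs subtracting each layer's cost, output reversed at the end, instead of A's forward loop with a running accumulator (alternative construction; same cost).


-- ===== PORT A =====
def layer_offsets_py (arch : List Int) : List Int :=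
  -- offsets = [0]; acc = 0; for i in range(len(arch)-1): … ; return offsets
  ((PySem.List.pyRange 0 ((arch.length : Int) - 1) 1).foldl
    (fun (st : List Int × Int) i =>
      let fan_in := PySem.List.pyGetD arch i 0        -- in range on every iteration
      let fan_out := PySem.List.pyGetD arch (i + 1) 0 -- in range on every iteration
      let acc := st.2 + (fan_in * fan_out + fan_out)
      (st.1 ++ [acc], acc))
    ([0], 0)).1

-- ===== PORT B =====
def layer_offsets_py_alt (arch : List Int) : List Int :=
  -- rem = sum(x*y + y for x, y in zip(arch, arch[1:])); out = [rem]
  -- for x, y in zip(reversed(arch[:-1]), reversed(arch[1:])): rem -= x*y + y; out.append(rem)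
  -- out.reverse(); return out
  let pairs := arch.zip (arch.drop 1)           -- zip(arch, arch[1:]) = zip(arch[:-1], arch[1:])
  let rem := (pairs.map (fun p => p.1 * p.2 + p.2)).sum
  let st := pairs.reverse.foldl                 -- zip(reversed(arch[:-1]), reversed(arch[1:])) = reverse of pairs
    (fun (st : List Int × Int) p =>
      let r := st.2 - (p.1 * p.2 + p.2)
      (st.1 ++ [r], r)) ([rem], rem)
  st.1.reverse

-- ===== PRECONDITION & SPEC =====
def Spec_layer_offsets_py (arch : List Int) (out : List Int) : Prop := out = layer_offsets_py_alt arch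
instance (arch : List Int) (out : List Int) : Decidable (Spec_layer_offsets_py arch out) := by unfold Spec_layer_offsets_py; infer_instance

-- ===== CLAIM (what is proved, stated in full; the proofs are below) =====
def Claim_equal_layer_offsets_py : Prop := ∀ (arch : List Int), Dom_layer_offsets_py arch → Spec_layer_offsets_py arch (layer_offsets_py arch)

-- ===== LEMMAS AND PROOFS =====

-- running partial sums of a list of sizes, starting from acc (proof-only helper)
def pvPsums : List Int → Int → List Int
  | [], _ => []
  | s :: t, acc => (acc + s) :: pvPsums t (acc + s)

-- the per-layer size table of an architecture (proof-only helper)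
def pvSizes (arch : List Int) : List Int :=
  (arch.zip (arch.drop 1)).map (fun p => p.1 * p.2 + p.2)

theorem pv_sizes_length (arch : List Int) : (pvSizes arch).length = arch.length - 1 := by
  simp [pvSizes, List.length_zip]

-- entry i of the size table is arch[i]*arch[i+1] + arch[i+1]
theorem pv_sizes_getD (arch : List Int) (i : Int) (h0 : 0 ≤ i)
    (h1 : i < ((pvSizes arch).length : Int)) :
    PySem.List.pyGetD (pvSizes arch) i 0
      = PySem.List.pyGetD arch i 0 * PySem.List.pyGetD arch (i + 1) 0
        + PySem.List.pyGetD arch (i + 1) 0 := by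
  have hlen := pv_sizes_length arch
  have hi : i.toNat < arch.length - 1 := by omega
  rw [PySem.List.pyGetD_eq_getElem _ 0 h0 (by omega),
      PySem.List.pyGetD_eq_getElem arch 0 h0 (by omega),
      PySem.List.pyGetD_eq_getElem arch (i := i + 1) 0 (by omega) (by omega)]
  have : (i + 1).toNat = i.toNat + 1 := by omega
  simp [pvSizes, this, List.getElem_zip]

-- A's pair-state fold over the size table computes [pre, then the partial sums from acc]
theorem pv_fold_psums (l : List Int) (pre : List Int) (acc : Int) :
    (l.foldl (fun (st : List Int × Int) s => (st.1 ++ [st.2 + s], st.2 + s)) (pre, acc)).1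
      = pre ++ pvPsums l acc := by
  induction l generalizing pre acc with
  | nil => simp [pvPsums]
  | cons s t ih => simp [pvPsums, ih]

-- descending remainders when subtracting sizes one by one (proof-only helper)
def pvDescs : List Int → Int → List Int
  | [], _ => []
  | s :: t, c => (c - s) :: pvDescs t (c - s)

-- B's subtracting fold computes [pre, then the descending remainders]
theorem pv_fold_descs (l : List (Int × Int)) (pre : List Int) (c : Int) :
    (l.foldl (fun (st : List Int × Int) p =>
        (st.1 ++ [st.2 - (p.1 * p.2 + p.2)], st.2 - (p.1 * p.2 + p.2)))
      (pre, c)).1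
      = pre ++ pvDescs (l.map (fun p => p.1 * p.2 + p.2)) c := by
  induction l generalizing pre c with
  | nil => simp [pvDescs]
  | cons s t ih => simp [pvDescs, ih]

theorem pv_descs_append (m m' : List Int) (c : Int) :
    pvDescs (m ++ m') c = pvDescs m c ++ pvDescs m' (c - m.sum) := by
  induction m generalizing c with
  | nil => simp [pvDescs]
  | cons s t ih => simp [pvDescs, ih, Int.sub_sub]

-- reversing the descending remainders of the reversed size list gives the ascending partial sums
theorem pv_descs_rev (l : List Int) (c : Int) :
    (pvDescs l.reverse c).reverse ++ [c] = (c - l.sum) :: pvPsums l (c - l.sum) := by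
  induction l generalizing c with
  | nil => simp [pvDescs, pvPsums]
  | cons s t ih =>
    rw [show (s :: t).reverse = t.reverse ++ [s] from by simp, pv_descs_append]
    simp only [pvDescs, List.reverse_append, List.reverse_cons, List.reverse_nil,
      List.nil_append, List.cons_append, List.sum_cons]
    rw [ih c]
    simp only [pvPsums, List.sum_reverse]
    rw [show c - t.sum - s = c - (s + t.sum) from by ring,
        show c - (s + t.sum) + s = c - t.sum from by ring]

-- B computes 0 followed by the partial sums of the size table
theorem pv_alt_psums (arch : List Int) :
    layer_offsets_py_alt arch = 0 :: pvPsums (pvSizes arch) 0 := by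
  unfold layer_offsets_py_alt
  simp only []
  rw [pv_fold_descs, List.map_reverse]
  set T := ((arch.zip (arch.drop 1)).map (fun p => p.1 * p.2 + p.2)).sum with hT
  have h := pv_descs_rev ((arch.zip (arch.drop 1)).map (fun p => p.1 * p.2 + p.2)) T
  rw [show T - ((arch.zip (arch.drop 1)).map (fun p => p.1 * p.2 + p.2)).sum = 0 from by rw [hT]; ring] at h
  calc ([T] ++ pvDescs ((arch.zip (arch.drop 1)).map (fun p => p.1 * p.2 + p.2)).reverse T).reverse
        = (pvDescs ((arch.zip (arch.drop 1)).map (fun p => p.1 * p.2 + p.2)).reverse T).reverse ++ [T] := by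
          simp
    _ = 0 :: pvPsums ((arch.zip (arch.drop 1)).map (fun p => p.1 * p.2 + p.2)) 0 := h
    _ = 0 :: pvPsums (pvSizes arch) 0 := by rw [pvSizes]

-- ===== VERDICT (by name: the statement is the Claim_ definition above) =====
theorem layer_offsets_py_spec : Claim_equal_layer_offsets_py := by
  intro arch _
  unfold Spec_layer_offsets_py layer_offsets_py
  rw [pv_alt_psums]
  have hrange : PySem.List.pyRange 0 ((arch.length : Int) - 1) 1
      = PySem.List.pyRange 0 ((pvSizes arch).length : Int) 1 := by
    rcases Nat.eq_zero_or_pos arch.length with h | h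
    · rw [PySem.List.pyRange_one_eq_nil (by omega),
        PySem.List.pyRange_one_eq_nil (by simp [pv_sizes_length, h])]
    · have := pv_sizes_length arch
      congr 1
      omega
  rw [hrange]
  have hcongr : (PySem.List.pyRange 0 ((pvSizes arch).length : Int) 1).foldl
      (fun (st : List Int × Int) i =>
        let fan_in := PySem.List.pyGetD arch i 0
        let fan_out := PySem.List.pyGetD arch (i + 1) 0
        let acc := st.2 + (fan_in * fan_out + fan_out)
        (st.1 ++ [acc], acc)) ([0], 0)
      = (PySem.List.pyRange 0 ((pvSizes arch).length : Int) 1).foldl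
      (fun (st : List Int × Int) i =>
        (st.1 ++ [st.2 + PySem.List.pyGetD (pvSizes arch) i 0],
          st.2 + PySem.List.pyGetD (pvSizes arch) i 0)) ([0], 0) := by
    apply PySem.List.foldl_congr_mem
    intro acc x hx
    have hmem := (PySem.List.mem_pyRange_one).mp hx
    simp only []
    rw [pv_sizes_getD arch x hmem.1 hmem.2]
  rw [hcongr, PySem.List.foldl_pyRange_zero_pyGetD' (pvSizes arch) 0
    (fun (st : List Int × Int) s => (st.1 ++ [st.2 + s], st.2 + s)) ([0], 0)]
  have := pv_fold_psums (pvSizes arch) [0] 0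
  simpa using this
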